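-- pv_equiv track=rewrite | github.com/rafizhafraan/24EXTENDED | 24backend.py | calcop
-- ===== SOURCE A (Python) =====
-- def calcop(lOperasi) : #menghasilkan total poin dari operasi yang didapat
--     poin = 0
--     for i in lOperasi :
--         if (i == "+") :
--             poin = poin + 5
--         elif (i == "-") :
--             poin = poin + 4
--         elif (i == "*") :
--             poin = poin + 3
--         elif (i == "/") :
--             poin = poin + 2
--
--     return poin #hasilnya berbentuk integer yang merepresentasikan poin dari operasi
-- ===== SOURCE B (Python) =====
-- def calcop(lOperasi):
--     # staged passes: count each operator separately, then one weighted sum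
--     return (5 * lOperasi.count("+")
--             + 4 * lOperasi.count("-")
--             + 3 * lOperasi.count("*")
--             + 2 * lOperasi.count("/"))
-- ===== Notes on version B (the rewrite author's own statement) =====
-- stated objective: simpler
-- what changed: Replaced the single accumulating if/elif loop with four independent list.count passes (one per operator) combined in one closed-form weighted sum; no accumulator, no per-element branching.
import Mathlib
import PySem

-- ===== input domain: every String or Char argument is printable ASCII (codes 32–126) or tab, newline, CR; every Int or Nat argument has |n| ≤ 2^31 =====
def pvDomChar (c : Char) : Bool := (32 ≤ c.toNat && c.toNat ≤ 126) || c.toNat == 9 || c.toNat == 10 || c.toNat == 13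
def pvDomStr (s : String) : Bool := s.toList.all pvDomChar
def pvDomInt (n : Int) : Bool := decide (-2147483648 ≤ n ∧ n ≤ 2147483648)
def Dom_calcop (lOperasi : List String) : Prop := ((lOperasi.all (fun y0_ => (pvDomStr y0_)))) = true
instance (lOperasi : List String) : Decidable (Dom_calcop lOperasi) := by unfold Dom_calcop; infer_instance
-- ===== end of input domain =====

-- ===== PORT A =====
def calcop (lOperasi : List String) : Int :=
  lOperasi.foldl (fun poin i =>
    if i == "+" then poin + 5
    else if i == "-" then poin + 4
    else if i == "*" then poin + 3
    else if i == "/" then poin + 2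
    else poin) 0

-- ===== PORT B =====
-- B: four independent list.count passes, combined in one weighted sum (no accumulator loop).
def calcop_alt (lOperasi : List String) : Int :=
  5 * (PySem.List.count lOperasi "+")
    + 4 * (PySem.List.count lOperasi "-")
    + 3 * (PySem.List.count lOperasi "*")
    + 2 * (PySem.List.count lOperasi "/")

-- ===== PRECONDITION & SPEC =====
def Spec_calcop (lOperasi : List String) (out : Int) : Prop := out = calcop_alt lOperasi
instance (lOperasi : List String) (out : Int) : Decidable (Spec_calcop lOperasi out) := by unfold Spec_calcop; infer_instance

-- ===== CLAIM =====
def Claim_equal_calcop : Prop := ∀ (lOperasi : List String), Dom_calcop lOperasi → Spec_calcop lOperasi (calcop lOperasi)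

-- ===== LEMMAS AND PROOFS =====
-- A's accumulating fold from any start equals the start plus the weighted operator counts.
theorem calcop_fold_count (l : List String) (poin : Int) :
    (l.foldl (fun poin i =>
      if i == "+" then poin + 5
      else if i == "-" then poin + 4
      else if i == "*" then poin + 3
      else if i == "/" then poin + 2
      else poin) poin)
    = poin + 5 * (l.count "+" : Int) + 4 * (l.count "-" : Int)
        + 3 * (l.count "*" : Int) + 2 * (l.count "/" : Int) := by
  induction l generalizing poin with
  | nil => simp
  | cons x xs ih =>
    simp only [List.foldl_cons, ih, List.count_cons]
    by_cases h1 : x = "+" <;> by_cases h2 : x = "-" <;> by_cases h3 : x = "*" <;> by_cases h4 : x = "/" <;>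
      simp_all <;> ring

-- ===== VERDICT =====
theorem calcop_spec : Claim_equal_calcop := by
  intro l _
  unfold Spec_calcop calcop calcop_alt
  simp only [PySem.List.count_eq, calcop_fold_count]
  ring
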